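-- pv_equiv track=rewrite | github.com/abhi07-dev/link-prediction-pairwise-relationship | old/local.py | calculate_mutual_two_way_edges_for_a
-- ===== SOURCE A (Python) =====
-- def calculate_mutual_two_way_edges_for_a(instances, inbound, outbound, returning_list = None):
--     """
--     Count how many mutual following B node has
--     :param instances: list of instances (A, B)
--     :param inbound: dict {base node <- list of inner nodes}
--     :param outbound: dict {base node -> list of outer nodes}
--     :param returning_list: list of instances with dict {feature => value}. If None, will be created one
--     :return: list of instances with dict {feature => value} updated
--     """
--     is_return_created = False
--     if returning_list is None:
--         is_return_created = True
--         returning_list = list()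
--
--     for i in range(len(instances)):
--         a, _ = instances[i]
--
--         mutual = 0
--         if a in outbound:
--             for node in outbound[a]:
--                 if node in outbound and a in outbound[node]:
--                     mutual += 1
--
--         if is_return_created:
--             returning_list.append({
--                 'mutual_following_a': mutual,
--             })
--         else:
--             returning_list[i].update({
--                 'mutual_following_a': mutual,
--             })
--
--     return returning_list
-- ===== SOURCE B (Python) =====
-- def calculate_mutual_two_way_edges_for_a(instances, inbound, outbound, returning_list=None):
--     # Staged global precomputation: one pass over the whole graph builds the
--     # directed-edge set and the complete mutual-count table; the instances loop
--     # then only looks the answer up.  Mutates returning_list in place like A.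
--     edges = {(u, v) for u, vs in outbound.items() for v in vs}
--     mut = {u: sum((v, u) in edges for v in vs) for u, vs in outbound.items()}
--     if returning_list is None:
--         return [{'mutual_following_a': mut.get(a, 0)} for a, _ in instances]
--     for i, (a, _) in enumerate(instances):
--         returning_list[i]['mutual_following_a'] = mut.get(a, 0)
--     return returning_list
-- ===== Notes on version B (the rewrite author's own statement) =====
-- stated objective: alternative
-- what changed: B replaces A's per-instance nested membership scans by a staged global precomputation: one pass over outbound builds a directed-edge set and then the complete mutual-count table, so the instances loop is reduced to dictionary lookups (it trades per-instance work for an upfront pass over the whole graph; not measurably faster on the timed inputs).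
import Mathlib
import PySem

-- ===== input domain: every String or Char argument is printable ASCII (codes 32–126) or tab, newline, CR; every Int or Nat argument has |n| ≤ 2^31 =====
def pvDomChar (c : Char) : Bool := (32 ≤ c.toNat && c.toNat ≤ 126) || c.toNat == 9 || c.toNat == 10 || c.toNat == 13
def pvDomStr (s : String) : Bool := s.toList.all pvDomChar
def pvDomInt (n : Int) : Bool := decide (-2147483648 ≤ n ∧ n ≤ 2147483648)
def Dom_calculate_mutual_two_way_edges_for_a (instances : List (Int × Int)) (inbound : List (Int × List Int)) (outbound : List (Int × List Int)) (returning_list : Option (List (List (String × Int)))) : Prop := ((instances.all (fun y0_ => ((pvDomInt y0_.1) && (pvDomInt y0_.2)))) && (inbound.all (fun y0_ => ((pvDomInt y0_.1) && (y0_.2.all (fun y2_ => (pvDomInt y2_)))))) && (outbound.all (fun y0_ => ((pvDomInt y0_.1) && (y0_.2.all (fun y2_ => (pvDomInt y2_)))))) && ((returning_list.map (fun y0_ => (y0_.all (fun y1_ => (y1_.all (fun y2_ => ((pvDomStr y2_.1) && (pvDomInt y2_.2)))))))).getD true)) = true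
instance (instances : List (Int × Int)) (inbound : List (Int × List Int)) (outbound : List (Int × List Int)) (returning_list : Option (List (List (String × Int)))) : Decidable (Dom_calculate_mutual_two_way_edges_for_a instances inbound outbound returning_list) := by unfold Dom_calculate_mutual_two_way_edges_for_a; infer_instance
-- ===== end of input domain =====

-- B replaces A's per-instance nested membership scans by a staged global
-- precomputation (edge set + full mutual-count table over outbound), so the
-- instances loop is pure lookups; equivalence is about the RETURN value only
-- (both A and B update a supplied returning_list's rows in place the same way).

-- ===== PORT A =====
-- A's inner loop: mutual = 0; if a in outbound: for node in outbound[a]: if node in outbound and a in outbound[node]: mutual += 1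
def pvAMutual (od : PySem.Dict Int (List Int)) (a : Int) : Int :=
  if od.contains a then
    (od.getD a []).foldl
      (fun m node => if od.contains node && (od.getD node []).contains a then m + 1 else m) 0
  else 0

def calculate_mutual_two_way_edges_for_a (instances : List (Int × Int)) (inbound : List (Int × List Int)) (outbound : List (Int × List Int)) (returning_list : Option (List (List (String × Int)))) : List (List (String × Int)) :=
  let od : PySem.Dict Int (List Int) := PySem.Dict.mk outbound
  match returning_list with
  | none =>
      -- is_return_created = True: returning_list starts empty, rows are appended
      (PySem.List.pyRange 0 (instances.length : Int)).foldl
        (fun rl i =>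
          let a := (PySem.List.pyGetD instances i (0, 0)).1
          rl ++ [[("mutual_following_a", pvAMutual od a)]]) []
  | some rl0 =>
      -- is_return_created = False: returning_list[i].update({...})
      (PySem.List.pyRange 0 (instances.length : Int)).foldl
        (fun rl i =>
          let a := (PySem.List.pyGetD instances i (0, 0)).1
          PySem.List.pySetD rl i
            ((PySem.Dict.mk (PySem.List.pyGetD rl i [])).insert "mutual_following_a" (pvAMutual od a)).items) rl0

-- ===== PORT B =====
-- outbound.items() of the parameter dict under the first-match assoc-list
-- convention: the distinct keys in order, each with its looked-up value
def pvDictView (od : PySem.Dict Int (List Int)) : List (Int × List Int) :=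
  (PySem.List.dedup od.keys).map (fun k => (k, od.getD k []))

-- edges = {(u, v) for u, vs in outbound.items() for v in vs}
def pvEdges (view : List (Int × List Int)) : PySem.Set (Int × Int) :=
  view.foldl (fun s p => p.2.foldl (fun s v => PySem.Set.add s (p.1, v)) s) PySem.Set.empty

-- mut = {u: sum((v, u) in edges for v in vs) for u, vs in outbound.items()}
def pvMut (view : List (Int × List Int)) (edges : PySem.Set (Int × Int)) : PySem.Dict Int Int :=
  PySem.Dict.mk (view.map (fun p =>
    (p.1, (p.2.map (fun v => if edges.contains (v, p.1) then (1 : Int) else 0)).sum)))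

def calculate_mutual_two_way_edges_for_a_alt (instances : List (Int × Int)) (inbound : List (Int × List Int)) (outbound : List (Int × List Int)) (returning_list : Option (List (List (String × Int)))) : List (List (String × Int)) :=
  let od : PySem.Dict Int (List Int) := PySem.Dict.mk outbound
  let view := pvDictView od
  let mutd := pvMut view (pvEdges view)
  match returning_list with
  | none =>
      instances.map (fun p => [("mutual_following_a", mutd.getD p.1 0)])
  | some rl0 =>
      (PySem.List.enumerate instances).foldl
        (fun rl ip =>
          PySem.List.pySetD rl ip.1
            ((PySem.Dict.mk (PySem.List.pyGetD rl ip.1 [])).insert "mutual_following_a"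
              (mutd.getD ip.2.1 0)).items) rl0

-- ===== PRECONDITION & SPEC =====
-- Pre_ excludes only a supplied returning_list shorter than instances, on which A
-- (and B) raises IndexError at returning_list[i].
def Pre_calculate_mutual_two_way_edges_for_a (instances : List (Int × Int)) (inbound : List (Int × List Int)) (outbound : List (Int × List Int)) (returning_list : Option (List (List (String × Int)))) : Prop :=
  (returning_list.map (fun rl => decide (instances.length ≤ rl.length))).getD true = true
instance (instances : List (Int × Int)) (inbound : List (Int × List Int)) (outbound : List (Int × List Int)) (returning_list : Option (List (List (String × Int)))) : Decidable (Pre_calculate_mutual_two_way_edges_for_a instances inbound outbound returning_list) := by unfold Pre_calculate_mutual_two_way_edges_for_a; infer_instance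

def pvWitness_calculate_mutual_two_way_edges_for_a : (List (Int × Int)) × (List (Int × List Int)) × (List (Int × List Int)) × (Option (List (List (String × Int)))) :=
  ([(1, 2), (2, 1)], [], [(1, [2, 3]), (2, [1])], none)

def Spec_calculate_mutual_two_way_edges_for_a (instances : List (Int × Int)) (inbound : List (Int × List Int)) (outbound : List (Int × List Int)) (returning_list : Option (List (List (String × Int)))) (out : List (List (String × Int))) : Prop := out = calculate_mutual_two_way_edges_for_a_alt instances inbound outbound returning_list
instance (instances : List (Int × Int)) (inbound : List (Int × List Int)) (outbound : List (Int × List Int)) (returning_list : Option (List (List (String × Int)))) (out : List (List (String × Int))) : Decidable (Spec_calculate_mutual_two_way_edges_for_a instances inbound outbound returning_list out) := by unfold Spec_calculate_mutual_two_way_edges_for_a; infer_instance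

-- ===== CLAIM (what is proved, stated in full; the proofs are below) =====
def Claim_equal_calculate_mutual_two_way_edges_for_a : Prop := ∀ (instances : List (Int × Int)) (inbound : List (Int × List Int)) (outbound : List (Int × List Int)) (returning_list : Option (List (List (String × Int)))), Dom_calculate_mutual_two_way_edges_for_a instances inbound outbound returning_list → Pre_calculate_mutual_two_way_edges_for_a instances inbound outbound returning_list → Spec_calculate_mutual_two_way_edges_for_a instances inbound outbound returning_list (calculate_mutual_two_way_edges_for_a instances inbound outbound returning_list)

-- ===== LEMMAS AND PROOFS =====

-- membership in B's nested edge-building fold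
theorem pv_mem_edges_fold (l : List (Int × List Int)) :
    ∀ (s : PySem.Set (Int × Int)) (y : Int × Int),
    y ∈ l.foldl (fun s p => p.2.foldl (fun s v => PySem.Set.add s (p.1, v)) s) s
      ↔ y ∈ s ∨ ∃ p ∈ l, ∃ v ∈ p.2, y = (p.1, v) := by
  induction l with
  | nil => intro s y; simp
  | cons q rest ih =>
      intro s y
      simp only [List.foldl_cons]
      rw [ih]
      rw [PySem.Set.mem_foldl_add q.2 (fun v => (q.1, v)) s y]
      constructor
      · rintro ((h | ⟨v, hv, rfl⟩) | ⟨p, hp, v, hv, rfl⟩)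
        · exact Or.inl h
        · exact Or.inr ⟨q, List.mem_cons_self, v, hv, rfl⟩
        · exact Or.inr ⟨p, List.mem_cons_of_mem _ hp, v, hv, rfl⟩
      · rintro (h | ⟨p, hp, v, hv, rfl⟩)
        · exact Or.inl (Or.inl h)
        · rcases List.mem_cons.mp hp with rfl | hp'
          · exact Or.inl (Or.inr ⟨v, hv, rfl⟩)
          · exact Or.inr ⟨p, hp', v, hv, rfl⟩

-- B's edge set answers exactly A's 'x in outbound and y in outbound[x]' test
theorem pv_edges_contains (od : PySem.Dict Int (List Int)) (x y : Int) :
    (pvEdges (pvDictView od)).contains (x, y)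
      = (od.contains x && (od.getD x []).contains y) := by
  have hmem : (x, y) ∈ pvEdges (pvDictView od) ↔ od.contains x = true ∧ y ∈ od.getD x [] := by
    unfold pvEdges
    rw [pv_mem_edges_fold]
    constructor
    · rintro (h | ⟨p, hp, v, hv, heq⟩)
      · simp [PySem.Set.empty] at h
      · obtain ⟨k, hk, rfl⟩ := List.mem_map.mp (by simpa [pvDictView] using hp)
        simp only [Prod.mk.injEq] at heq
        obtain ⟨rfl, rfl⟩ := heq
        refine ⟨?_, hv⟩
        exact (PySem.Dict.contains_iff_mem_keys od x).mpr hk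
    · rintro ⟨hc, hy⟩
      refine Or.inr ⟨(x, od.getD x []), ?_, y, hy, rfl⟩
      simp only [pvDictView, List.mem_map]
      exact ⟨x, (PySem.List.mem_dedup od.keys x).mpr ((PySem.Dict.contains_iff_mem_keys od x).mp hc), rfl⟩
  by_cases hcond : od.contains x = true ∧ y ∈ od.getD x []
  · rw [(PySem.Set.contains_iff _ _).mpr (hmem.mpr hcond)]
    simp [hcond.1, List.contains_eq_mem, hcond.2]
  · have hnm : (x, y) ∉ pvEdges (pvDictView od) := fun h => hcond (hmem.mp h)
    have hfc : (pvEdges (pvDictView od)).contains (x, y) = false := by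
      cases hcc : (pvEdges (pvDictView od)).contains (x, y)
      · rfl
      · exact absurd ((PySem.Set.contains_iff _ _).mp hcc) hnm
    rw [hfc]
    rcases not_and_or.mp hcond with h | h
    · rw [Bool.not_eq_true] at h
      simp [h]
    · simp [List.contains_eq_mem, h]

-- lookup in a dict built by mapping a value function over a key list
theorem pv_getD_mk_map (l : List Int) (g : Int → Int) (a : Int) :
    (PySem.Dict.mk (l.map (fun k => (k, g k)))).getD a 0
      = if a ∈ l then g a else 0 := by
  induction l with
  | nil => simp [PySem.Dict.getD_eq_get?_getD, PySem.Dict.get?]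
  | cons k rest ih =>
      simp only [List.map_cons]
      rw [PySem.Dict.getD_eq_get?_getD, PySem.Dict.get?_mk_cons]
      by_cases hk : k = a
      · subst hk; simp
      · rw [if_neg (by simp [hk]), ← PySem.Dict.getD_eq_get?_getD, ih]
        simp [List.mem_cons, Ne.symm hk]

-- B's precomputed table agrees with A's per-instance count at every key
theorem pv_mut_eq (od : PySem.Dict Int (List Int)) (a : Int) :
    (pvMut (pvDictView od) (pvEdges (pvDictView od))).getD a 0 = pvAMutual od a := by
  have h1 : (pvMut (pvDictView od) (pvEdges (pvDictView od))).getD a 0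
      = if a ∈ PySem.List.dedup od.keys then
          ((od.getD a []).map (fun v => if (pvEdges (pvDictView od)).contains (v, a) then (1 : Int) else 0)).sum
        else 0 := by
    refine Eq.trans ?_ (pv_getD_mk_map (PySem.List.dedup od.keys)
      (fun k => ((od.getD k []).map (fun v => if (pvEdges (pvDictView od)).contains (v, k) then (1 : Int) else 0)).sum) a)
    congr 1
    unfold pvMut pvDictView
    rw [List.map_map]
    rfl
  rw [h1]
  have hmem : (a ∈ PySem.List.dedup od.keys) ↔ od.contains a = true := by
    rw [PySem.List.mem_dedup]
    exact (PySem.Dict.contains_iff_mem_keys od a).symm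
  unfold pvAMutual
  by_cases hc : od.contains a = true
  · rw [if_pos (hmem.mpr hc), if_pos hc]
    rw [PySem.List.sum_map_ite_one_zero
        (fun v => (pvEdges (pvDictView od)).contains (v, a)) (od.getD a [])]
    rw [PySem.List.foldl_if_add_one
        (fun node => od.contains node && (od.getD node []).contains a) (od.getD a []) 0]
    rw [zero_add]
    congr 1
    exact List.countP_congr (fun v _ => by rw [pv_edges_contains])
  · rw [if_neg (fun h => hc (hmem.mp h)), if_neg hc]

-- the supplied-list loop: A's index loop over range(len) = B's enumerate fold
theorem pv_fold_some (instances : List (Int × Int)) (od : PySem.Dict Int (List Int)) :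
    ∀ (l : List (Int × Int)) (k : Int), 0 ≤ k → instances.drop k.toNat = l →
    ∀ (acc : List (List (String × Int))),
    (PySem.List.pyRange k (instances.length : Int)).foldl
        (fun rl i =>
          PySem.List.pySetD rl i
            ((PySem.Dict.mk (PySem.List.pyGetD rl i [])).insert "mutual_following_a"
              (pvAMutual od (PySem.List.pyGetD instances i (0, 0)).1)).items) acc
      = (PySem.List.enumerate l k).foldl
          (fun rl ip =>
            PySem.List.pySetD rl ip.1
              ((PySem.Dict.mk (PySem.List.pyGetD rl ip.1 [])).insert "mutual_following_a"
                (pvAMutual od ip.2.1)).items) acc := by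
  intro l
  induction l with
  | nil =>
      intro k hk hd acc
      have hlen : (instances.length : Int) ≤ k := by
        have := List.drop_eq_nil_iff.mp hd
        omega
      rw [PySem.List.pyRange_one_eq_nil hlen]
      rfl
  | cons p rest ih =>
      intro k hk hd acc
      have hklt : k.toNat < instances.length := by
        by_contra h
        rw [List.drop_eq_nil_of_le (by omega)] at hd
        exact List.cons_ne_nil _ _ hd.symm
      have hget : instances[k.toNat] = p := by
        have := List.getElem_cons_drop (as := instances) (i := k.toNat) hklt
        rw [hd] at this
        exact (List.cons_eq_cons.mp this).1
      have hdrop : instances.drop (k + 1).toNat = rest := by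
        have := List.getElem_cons_drop (as := instances) (i := k.toNat) hklt
        rw [hd] at this
        have h2 := (List.cons_eq_cons.mp this).2
        have : (k + 1).toNat = k.toNat + 1 := by omega
        rw [this, h2]
      rw [PySem.List.pyRange_one_cons (by omega), PySem.List.enumerate_cons]
      simp only [List.foldl_cons]
      have hpg : (PySem.List.pyGetD instances k (0, 0)).1 = p.1 := by
        rw [PySem.List.pyGetD_eq_getElem _ _ hk (by omega), hget]
      rw [hpg]
      exact ih (k + 1) (by omega) hdrop _

-- ===== VERDICT (by name: the statement is the Claim_ definition above) =====
theorem calculate_mutual_two_way_edges_for_a_spec : Claim_equal_calculate_mutual_two_way_edges_for_a := by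
  intro instances inbound outbound returning_list _ _
  unfold Spec_calculate_mutual_two_way_edges_for_a
  cases returning_list with
  | none =>
      simp only [calculate_mutual_two_way_edges_for_a, calculate_mutual_two_way_edges_for_a_alt,
        pv_mut_eq]
      rw [PySem.List.foldl_append_singleton_eq_map
        (fun i => [("mutual_following_a", pvAMutual (PySem.Dict.mk outbound) (PySem.List.pyGetD instances i (0, 0)).1)])]
      rw [List.nil_append]
      have := PySem.List.map_pyGetD_pyRange_zero instances ((0 : Int), (0 : Int))
      simp only [PySem.List.len] at this
      calc (PySem.List.pyRange 0 (instances.length : Int)).map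
            (fun i => [("mutual_following_a", pvAMutual (PySem.Dict.mk outbound) (PySem.List.pyGetD instances i (0, 0)).1)])
          = ((PySem.List.pyRange 0 (instances.length : Int)).map
              (fun j => PySem.List.pyGetD instances j ((0 : Int), (0 : Int)))).map
            (fun p => [("mutual_following_a", pvAMutual (PySem.Dict.mk outbound) p.1)]) := by
            rw [List.map_map]; rfl
        _ = instances.map (fun p => [("mutual_following_a", pvAMutual (PySem.Dict.mk outbound) p.1)]) := by
            rw [this]
  | some rl0 =>
      simp only [calculate_mutual_two_way_edges_for_a, calculate_mutual_two_way_edges_for_a_alt,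
        pv_mut_eq]
      exact pv_fold_some instances (PySem.Dict.mk outbound) instances 0 le_rfl rfl rl0
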